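-- pv_equiv track=rewrite | github.com/ARobicsek/psalms-AI-analysis | scripts/statistical_analysis/skipgram_extractor.py | extract_skipgrams
-- ===== SOURCE A (Python) =====
-- from typing import List, Tuple, Set, Dict
-- from itertools import combinations
--
-- def extract_skipgrams(
--
--     words: List[Dict[str, str]],
--     n: int,
--     max_gap: int
-- ) -> Set[Tuple[str, str, str]]:
--     """
--     Extract n-word skip-grams within max_gap window.
--
--     For n=2, max_gap=5: extracts all word pairs where the second word
--     appears within 5 words of the first.
--
--     For n=3, max_gap=7: extracts all word triples where the third word
--     appears within 7 words of the first.
--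
--     Args:
--         words: List of word dictionaries
--         n: Number of words in pattern (2, 3, or 4+)
--         max_gap: Maximum distance between first and last word
--
--     Returns:
--         Set of unique skip-gram tuples: (pattern_roots, pattern_hebrew, full_span_hebrew)
--     """
--     skipgrams = set()
--
--     for i in range(len(words)):
--         # Define window: from position i to i+max_gap
--         window_end = min(i + max_gap, len(words))
--         window_indices = range(i, window_end)
--
--         # Generate all n-word combinations within window
--         for combo_indices in combinations(window_indices, n):
--             if len(combo_indices) == n:
--                 # Extract roots for the matched words
--                 matched_roots = [words[idx]['root'] for idx in combo_indices]
--                 pattern_roots = ' '.join(matched_roots)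
--
--                 # Extract Hebrew for the matched words only
--                 matched_hebrew = [words[idx]['hebrew'] for idx in combo_indices]
--                 pattern_hebrew = ' '.join(matched_hebrew)
--
--                 # Extract FULL Hebrew span (from first to last index, including gaps)
--                 first_idx = combo_indices[0]
--                 last_idx = combo_indices[-1]
--                 full_span_hebrew = ' '.join(words[idx]['hebrew']
--                                             for idx in range(first_idx, last_idx + 1))
--
--                 # Store tuple: (roots, matched hebrew, full span hebrew)
--                 skipgrams.add((pattern_roots, pattern_hebrew, full_span_hebrew))
--
--     return skipgrams
-- ===== SOURCE B (Python) =====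
-- from itertools import combinations
--
-- def extract_skipgrams(words, n, max_gap):
--     """Same skip-gram set, but each index combination is generated exactly once:
--     window 0 is enumerated in full; every later window i contributes only the
--     combinations whose last word is the window's new right edge i+max_gap-1
--     (all its other combinations already occurred in window i-1)."""
--     skipgrams = set()
--     length = len(words)
--     if max_gap <= 0:
--         return skipgrams
--     for i in range(length):
--         if i == 0:
--             new_combos = list(combinations(range(0, min(max_gap, length)), n))
--         elif i + max_gap - 1 < length:
--             last = i + max_gap - 1
--             new_combos = [c + (last,) for c in combinations(range(i, last), n - 1)]
--         else:
--             continue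
--         for combo in new_combos:
--             roots = ' '.join(words[idx]['root'] for idx in combo)
--             hebrew = ' '.join(words[idx]['hebrew'] for idx in combo)
--             span = ' '.join(words[idx]['hebrew']
--                             for idx in range(combo[0], combo[-1] + 1))
--             skipgrams.add((roots, hebrew, span))
--     return skipgrams
-- ===== Notes on version B (the rewrite author's own statement) =====
-- stated objective: faster
-- what changed: Instead of re-enumerating all C(max_gap,n) combinations of every sliding window, B enumerates window 0 once and then, for each later window start i, generates only the combinations whose last element is the window's new right edge i+max_gap-1 (choosing the other n-1 indices from the window's interior), so every index combination is produced exactly once instead of up to max_gap times.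
import Mathlib
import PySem

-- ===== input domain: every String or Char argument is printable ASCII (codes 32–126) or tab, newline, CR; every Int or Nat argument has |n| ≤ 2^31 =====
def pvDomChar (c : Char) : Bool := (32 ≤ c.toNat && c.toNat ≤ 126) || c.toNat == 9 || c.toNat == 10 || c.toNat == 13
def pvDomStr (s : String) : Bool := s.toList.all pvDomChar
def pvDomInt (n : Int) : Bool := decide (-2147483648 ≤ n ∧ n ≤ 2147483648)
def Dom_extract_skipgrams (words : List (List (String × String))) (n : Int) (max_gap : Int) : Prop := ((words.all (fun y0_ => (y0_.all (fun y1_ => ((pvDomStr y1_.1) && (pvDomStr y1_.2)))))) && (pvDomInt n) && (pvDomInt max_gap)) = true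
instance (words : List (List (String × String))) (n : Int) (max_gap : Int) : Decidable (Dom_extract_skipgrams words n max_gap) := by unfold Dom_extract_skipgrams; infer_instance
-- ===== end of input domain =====

-- B enumerates each index combination once (window 0 in full, later windows only the combos
-- ending at the new right edge) instead of re-enumerating every sliding window: faster, same set.

-- ===== PORT A =====
-- shared helpers: both Python versions compute the identical (roots, hebrew, span) triple.
-- d['k'] (first match in the association list); the "" default only totalizes the function:
-- Pre_ guarantees the key is present wherever the Python actually accesses it.
def pvLookup (d : List (String × String)) (k : String) : String :=
  (((d.find? (fun p => p.1 == k)).map (fun p => p.2)).getD "")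

-- the tuple built in the loop body: (pattern_roots, pattern_hebrew, full_span_hebrew);
-- headD/getLastD totalize combo[0]/combo[-1] (combos are nonempty whenever the body runs, n ≥ 1)
def pvTriple (words : List (List (String × String))) (combo : List Int) : String × String × String :=
  (PySem.Str.join " " (combo.map (fun idx => pvLookup (PySem.List.pyGetD words idx []) "root")),
   PySem.Str.join " " (combo.map (fun idx => pvLookup (PySem.List.pyGetD words idx []) "hebrew")),
   PySem.Str.join " " ((PySem.List.pyRange (combo.headD 0) (combo.getLastD 0 + 1) 1).map
     (fun idx => pvLookup (PySem.List.pyGetD words idx []) "hebrew")))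

def extract_skipgrams (words : List (List (String × String))) (n : Int) (max_gap : Int) :
    List (String × String × String) :=
  (List.range words.length).foldl
    (fun sk (i : Nat) =>
      (PySem.List.combinations
          (PySem.List.pyRange (i : Int) (min ((i : Int) + max_gap) (words.length : Int)) 1)
          n.toNat).foldl
        (fun sk combo =>
          if (combo.length : Int) = n then PySem.Set.add sk (pvTriple words combo) else sk)
        sk)
    []

-- ===== PORT B =====
def extract_skipgrams_alt (words : List (List (String × String))) (n : Int) (max_gap : Int) :
    List (String × String × String) :=
  if max_gap ≤ 0 then [] else
  (List.range words.length).foldl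
    (fun sk (i : Nat) =>
      (if i = 0 then
         PySem.List.combinations
           (PySem.List.pyRange 0 (min max_gap (words.length : Int)) 1) n.toNat
       else if (i : Int) + max_gap - 1 < (words.length : Int) then
         (PySem.List.combinations
             (PySem.List.pyRange (i : Int) ((i : Int) + max_gap - 1) 1) (n - 1).toNat).map
           (fun c => c ++ [(i : Int) + max_gap - 1])
       else []).foldl
        (fun sk combo => PySem.Set.add sk (pvTriple words combo)) sk)
    []

-- ===== PRECONDITION & SPEC =====
-- Pre_ excludes exactly the inputs where the Python A raises: n ≤ 0 with nonempty words
-- (ValueError from combinations for n < 0, IndexError on combo_indices[0] for n = 0), and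
-- missing 'root'/'hebrew' keys when some combination is actually formed (1 ≤ n ≤ min(max_gap, len),
-- which makes every word's entry accessed) — KeyError.
def Pre_extract_skipgrams (words : List (List (String × String))) (n : Int) (max_gap : Int) : Prop :=
  (words = [] ∨ 1 ≤ n) ∧
  (1 ≤ n ∧ n ≤ max_gap ∧ n ≤ (words.length : Int) →
    ∀ d ∈ words, "root" ∈ d.map Prod.fst ∧ "hebrew" ∈ d.map Prod.fst)
instance (words : List (List (String × String))) (n : Int) (max_gap : Int) :
    Decidable (Pre_extract_skipgrams words n max_gap) := by
  unfold Pre_extract_skipgrams; infer_instance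

def pvWitness_extract_skipgrams : (List (List (String × String))) × Int × Int :=
  ([[("root", "a"), ("hebrew", "x")], [("root", "b"), ("hebrew", "y")]], 2, 2)

def Spec_extract_skipgrams (words : List (List (String × String))) (n : Int) (max_gap : Int) (out : List (String × String × String)) : Prop := out = extract_skipgrams_alt words n max_gap
instance (words : List (List (String × String))) (n : Int) (max_gap : Int) (out : List (String × String × String)) : Decidable (Spec_extract_skipgrams words n max_gap out) := by unfold Spec_extract_skipgrams; infer_instance

-- ===== CLAIM (what is proved, stated in full; the proofs are below) =====
def Claim_equal_extract_skipgrams : Prop := ∀ (words : List (List (String × String))) (n : Int) (max_gap : Int), Dom_extract_skipgrams words n max_gap → Pre_extract_skipgrams words n max_gap → Spec_extract_skipgrams words n max_gap (extract_skipgrams words n max_gap)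

-- ===== LEMMAS AND PROOFS =====

-- the state of A's / B's outer loop after the first k iterations
def pvFA (words : List (List (String × String))) (n : Int) (max_gap : Int) (k : Nat) :
    List (String × String × String) :=
  (List.range k).foldl
    (fun sk (i : Nat) =>
      (PySem.List.combinations
          (PySem.List.pyRange (i : Int) (min ((i : Int) + max_gap) (words.length : Int)) 1)
          n.toNat).foldl
        (fun sk combo =>
          if (combo.length : Int) = n then PySem.Set.add sk (pvTriple words combo) else sk)
        sk)
    []

def pvFB (words : List (List (String × String))) (n : Int) (max_gap : Int) (k : Nat) :
    List (String × String × String) :=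
  (List.range k).foldl
    (fun sk (i : Nat) =>
      (if i = 0 then
         PySem.List.combinations
           (PySem.List.pyRange 0 (min max_gap (words.length : Int)) 1) n.toNat
       else if (i : Int) + max_gap - 1 < (words.length : Int) then
         (PySem.List.combinations
             (PySem.List.pyRange (i : Int) ((i : Int) + max_gap - 1) 1) (n - 1).toNat).map
           (fun c => c ++ [(i : Int) + max_gap - 1])
       else []).foldl
        (fun sk combo => PySem.Set.add sk (pvTriple words combo)) sk)
    []

def pvWin (words : List (List (String × String))) (max_gap : Int) (j : Nat) : List Int :=
  PySem.List.pyRange (j : Int) (min ((j : Int) + max_gap) (words.length : Int)) 1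

-- fold of Set.add skips elements already present: filtering them away does not change the result
theorem pvFoldlAddFilter {α β : Type} [BEq α] [LawfulBEq α] (f : β → α) (p : β → Bool) :
    ∀ (xs : List β) (S : List α), (∀ x ∈ xs, p x = false → f x ∈ S) →
      xs.foldl (fun s x => PySem.Set.add s (f x)) S
        = (xs.filter p).foldl (fun s x => PySem.Set.add s (f x)) S := by
  intro xs
  induction xs with
  | nil => intro S _; rfl
  | cons x xs ih =>
    intro S h
    by_cases hp : p x = true
    · rw [List.filter_cons_of_pos hp]
      simp only [List.foldl_cons]
      exact ih _ (fun y hy hpy => (PySem.Set.mem_add _ _ _).mpr (Or.inl (h y (by simp [hy]) hpy)))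
    · have hp' : p x = false := by simpa using hp
      rw [List.filter_cons_of_neg (by simp [hp'])]
      simp only [List.foldl_cons]
      rw [PySem.Set.add_of_mem (h x (by simp) hp')]
      exact ih _ (fun y hy hpy => h y (by simp [hy]) hpy)

-- a sublist of ys ++ [l] that does not end in l is a sublist of ys
theorem pvSublistDrop {α : Type} (c ys : List α) (l : α)
    (h : c.Sublist (ys ++ [l])) (hne : c.getLast? ≠ some l) : c.Sublist ys := by
  rcases List.sublist_append_iff.mp h with ⟨c1, c2, rfl, h1, h2⟩
  rcases List.sublist_singleton.mp h2 with rfl | rfl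
  · simpa using h1
  · exact absurd List.getLast?_concat hne

-- the combinations of ys ++ [l] ending in l are exactly the (n)-combinations of ys with l appended
theorem pvCombosFilterLast {α : Type} [DecidableEq α] (l : α) :
    ∀ (ys : List α) (n : Nat), l ∉ ys →
      (PySem.List.combinations (ys ++ [l]) (n + 1)).filter
          (fun c => decide (c.getLast? = some l))
        = (PySem.List.combinations ys n).map (fun c => c ++ [l]) := by
  intro ys
  induction ys with
  | nil =>
    intro n _
    cases n with
    | zero =>
      simp [PySem.List.combinations_cons_succ, PySem.List.combinations_zero,
        PySem.List.combinations_nil_succ]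
    | succ m =>
      simp [PySem.List.combinations_cons_succ, PySem.List.combinations_nil_succ]
  | cons y ys ih =>
    intro n hmem
    have hyl : y ≠ l := fun h => hmem (by simp [h])
    have hl : l ∉ ys := fun h => hmem (by simp [h])
    have hcons : (y :: ys) ++ [l] = y :: (ys ++ [l]) := rfl
    cases n with
    | zero =>
      rw [hcons, PySem.List.combinations_cons_succ, List.filter_append,
        PySem.List.combinations_zero]
      rw [ih 0 hl]
      simp [PySem.List.combinations_zero, hyl]
    | succ m =>
      rw [hcons, PySem.List.combinations_cons_succ, List.filter_append]
      rw [ih (m + 1) hl]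
      have hmapfil :
          ((PySem.List.combinations (ys ++ [l]) (m + 1)).map (fun c => y :: c)).filter
              (fun c => decide (c.getLast? = some l))
            = ((PySem.List.combinations (ys ++ [l]) (m + 1)).filter
                (fun c => decide (c.getLast? = some l))).map (fun c => y :: c) := by
        rw [List.filter_map]
        congr 1
        apply List.filter_congr
        intro c hc
        have hlen := PySem.List.length_of_mem_combinations hc
        match c, hlen with
        | d :: cs, _ => simp [List.getLast?_cons_cons, Function.comp]
      rw [hmapfil, ih m hl]
      rw [PySem.List.combinations_cons_succ, List.map_append, List.map_map, List.map_map]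
      rfl

-- the outer loops advance one window at a time
theorem pvFA_succ (words : List (List (String × String))) (n max_gap : Int) (k : Nat) :
    pvFA words n max_gap (k + 1)
      = (PySem.List.combinations (pvWin words max_gap k) n.toNat).foldl
          (fun sk combo =>
            if (combo.length : Int) = n then PySem.Set.add sk (pvTriple words combo) else sk)
          (pvFA words n max_gap k) := by
  unfold pvFA pvWin
  rw [List.range_succ, List.foldl_append, List.foldl_cons, List.foldl_nil]

theorem pvFB_succ (words : List (List (String × String))) (n max_gap : Int) (k : Nat) :
    pvFB words n max_gap (k + 1)
      = (if k = 0 then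
           PySem.List.combinations
             (PySem.List.pyRange 0 (min max_gap (words.length : Int)) 1) n.toNat
         else if (k : Int) + max_gap - 1 < (words.length : Int) then
           (PySem.List.combinations
               (PySem.List.pyRange (k : Int) ((k : Int) + max_gap - 1) 1) (n - 1).toNat).map
             (fun c => c ++ [(k : Int) + max_gap - 1])
         else []).foldl
          (fun sk combo => PySem.Set.add sk (pvTriple words combo)) (pvFB words n max_gap k) := by
  unfold pvFB
  rw [List.range_succ, List.foldl_append, List.foldl_cons, List.foldl_nil]

-- A's length guard is always true on combinations output (for 1 ≤ n)
theorem pvGuard (words : List (List (String × String))) (n : Int) (hn : 1 ≤ n)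
    (ws : List Int) (S : List (String × String × String)) :
    (PySem.List.combinations ws n.toNat).foldl
        (fun sk combo =>
          if (combo.length : Int) = n then PySem.Set.add sk (pvTriple words combo) else sk) S
      = (PySem.List.combinations ws n.toNat).foldl
          (fun sk combo => PySem.Set.add sk (pvTriple words combo)) S := by
  apply PySem.List.foldl_congr_mem
  intro acc c hc
  have hlen := PySem.List.length_of_mem_combinations hc
  rw [if_pos (by rw [hlen]; omega)]

-- main invariant: after k windows the two loop states are equal, and every combination that fits
-- in an already-processed window has its triple in the state
theorem pvMain (words : List (List (String × String))) (n max_gap : Int)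
    (hn : 1 ≤ n) (hg : 1 ≤ max_gap) :
    ∀ k, k ≤ words.length →
      pvFA words n max_gap k = pvFB words n max_gap k ∧
      ∀ j, j < k → ∀ c : List Int, c.Sublist (pvWin words max_gap j) → c.length = n.toNat →
        pvTriple words c ∈ pvFA words n max_gap k := by
  intro k
  induction k with
  | zero => exact fun _ => ⟨rfl, fun j hj => absurd hj (Nat.not_lt_zero j)⟩
  | succ k ih =>
    intro hk1
    obtain ⟨hEq, hCov⟩ := ih (Nat.le_of_succ_le hk1)
    have hkL : (k : Int) < (words.length : Int) := by exact_mod_cast hk1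
    have hAstep := pvFA_succ words n max_gap k
    rw [pvGuard words n hn] at hAstep
    -- coverage is independent of the case analysis:
    have hCov' : ∀ j, j < k + 1 → ∀ c : List Int, c.Sublist (pvWin words max_gap j) →
        c.length = n.toNat → pvTriple words c ∈ pvFA words n max_gap (k + 1) := by
      intro j hj c hsub hlen
      rw [hAstep]
      rcases Nat.lt_succ_iff_lt_or_eq.mp hj with hj' | rfl
      · exact (PySem.Set.mem_foldl_add _ _ _ _).mpr (Or.inl (hCov j hj' c hsub hlen))
      · exact (PySem.Set.mem_foldl_add _ _ _ _).mpr
          (Or.inr ⟨c, (PySem.List.mem_combinations_iff _ _ _).mpr ⟨hsub, hlen⟩, rfl⟩)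
    refine ⟨?_, hCov'⟩
    rw [hAstep, pvFB_succ, ← hEq]
    rcases Nat.eq_zero_or_pos k with rfl | hkpos
    · -- first window: B enumerates it in full, identical list
      rw [if_pos rfl]
      have : pvWin words max_gap 0 = PySem.List.pyRange 0 (min max_gap (words.length : Int)) 1 := by
        unfold pvWin; norm_num
      rw [this]
    · rw [if_neg (by omega)]
      have hk1' : ((k - 1 : Nat) : Int) = (k : Int) - 1 := by omega
      by_cases hfull : (k : Int) + max_gap - 1 < (words.length : Int)
      · -- full window: A's window is ys ++ [l]; B adds exactly the combos ending in l
        rw [if_pos hfull]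
        set l : Int := (k : Int) + max_gap - 1 with hldef
        set ys : List Int := PySem.List.pyRange (k : Int) l 1 with hysdef
        have hwin : pvWin words max_gap k = ys ++ [l] := by
          unfold pvWin
          have hmin : min ((k : Int) + max_gap) (words.length : Int) = l + 1 := by omega
          rw [hmin, PySem.List.pyRange_one_succ_right (by omega)]
        obtain ⟨m, hm⟩ : ∃ m, n.toNat = m + 1 := ⟨n.toNat - 1, by omega⟩
        have hlys : l ∉ ys := by
          intro h
          have := (PySem.List.mem_pyRange_one).mp h
          omega
        have hprev : ys.Sublist (pvWin words max_gap (k - 1)) := by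
          have hwin' : pvWin words max_gap (k - 1) = ((k : Int) - 1) :: ys := by
            unfold pvWin
            rw [hk1']
            have hmin : min ((k : Int) - 1 + max_gap) (words.length : Int) = l := by omega
            rw [hmin, PySem.List.pyRange_one_cons (by omega)]
            rw [show (k : Int) - 1 + 1 = (k : Int) by ring]
          rw [hwin']
          exact List.sublist_cons_self _ _
        rw [hwin, hm]
        rw [pvFoldlAddFilter (pvTriple words) (fun c => decide (c.getLast? = some l))
          _ _ ?dropped]
        case dropped =>
          intro c hc hpc
          have hmem := (PySem.List.mem_combinations_iff _ _ _).mp hc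
          have hcys : c.Sublist ys :=
            pvSublistDrop c ys l hmem.1 (by simpa using hpc)
          exact hCov (k - 1) (by omega) c (hcys.trans hprev) (by rw [hmem.2, hm])
        rw [pvCombosFilterLast l ys m hlys]
        have hmn : (n - 1).toNat = m := by omega
        rw [hmn]
      · -- truncated window: everything in it was already in window k-1; B adds nothing
        rw [if_neg hfull]
        have hwin : pvWin words max_gap k
            = PySem.List.pyRange (k : Int) (words.length : Int) 1 := by
          unfold pvWin
          have : min ((k : Int) + max_gap) (words.length : Int) = (words.length : Int) := by omega
          rw [this]
        have hprev : (PySem.List.pyRange (k : Int) (words.length : Int) 1).Sublist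
            (pvWin words max_gap (k - 1)) := by
          have hwin' : pvWin words max_gap (k - 1)
              = ((k : Int) - 1) :: PySem.List.pyRange (k : Int) (words.length : Int) 1 := by
            unfold pvWin
            rw [hk1']
            have : min ((k : Int) - 1 + max_gap) (words.length : Int) = (words.length : Int) := by
              omega
            rw [this, PySem.List.pyRange_one_cons (by omega)]
            rw [show (k : Int) - 1 + 1 = (k : Int) by ring]
          rw [hwin']
          exact List.sublist_cons_self _ _
        rw [pvFoldlAddFilter (pvTriple words) (fun _ => false) _ _ ?allold]
        case allold =>
          intro c hc _
          have hmem := (PySem.List.mem_combinations_iff _ _ _).mp hc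
          rw [hwin] at hmem
          exact hCov (k - 1) (by omega) c (hmem.1.trans hprev) hmem.2
        simp

-- with a nonpositive gap every window is empty, so A builds nothing (for 1 ≤ n)
theorem pvA_gap_nonpos (words : List (List (String × String))) (n max_gap : Int)
    (hn : 1 ≤ n) (hg : max_gap ≤ 0) : extract_skipgrams words n max_gap = [] := by
  unfold extract_skipgrams
  obtain ⟨m, hm⟩ : ∃ m, n.toNat = m + 1 := ⟨n.toNat - 1, by omega⟩
  have hstep : ∀ (sk : List (String × String × String)) (i : Nat), i ∈ List.range words.length →
      (PySem.List.combinations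
          (PySem.List.pyRange (i : Int) (min ((i : Int) + max_gap) (words.length : Int)) 1)
          n.toNat).foldl
        (fun sk combo =>
          if (combo.length : Int) = n then PySem.Set.add sk (pvTriple words combo) else sk)
        sk = sk := by
    intro sk i _
    rw [PySem.List.pyRange_one_eq_nil (by omega), hm, PySem.List.combinations_nil_succ]
    rfl
  exact (PySem.List.foldl_congr_mem (List.range words.length) _ (fun sk _ => sk) []
    (fun acc x hx => hstep acc x hx)).trans (PySem.List.foldl_ignore _ _)

-- ===== VERDICT (by name: the statement is the Claim_ definition above) =====
theorem extract_skipgrams_spec : Claim_equal_extract_skipgrams := by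
  intro words n max_gap _ hpre
  unfold Spec_extract_skipgrams
  rcases hpre.1 with rfl | hn
  · simp [extract_skipgrams, extract_skipgrams_alt]
  · by_cases hg : max_gap ≤ 0
    · rw [pvA_gap_nonpos words n max_gap hn hg]
      unfold extract_skipgrams_alt
      rw [if_pos hg]
    · have hg' : 1 ≤ max_gap := by omega
      have hA : extract_skipgrams words n max_gap = pvFA words n max_gap words.length := rfl
      have hB : extract_skipgrams_alt words n max_gap = pvFB words n max_gap words.length := by
        unfold extract_skipgrams_alt pvFB
        rw [if_neg hg]
      rw [hA, hB]
      exact (pvMain words n max_gap hn hg' words.length le_rfl).1
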